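-- pv_equiv track=rewrite | github.com/SilverTheShinyEevee/PokeSetSmith | showdown.py | clamp_ev_distribution
-- ===== SOURCE A (Python) =====
-- from typing import Dict, List, Optional, Tuple
--
-- def clamp_ev_distribution(evs: Dict[str,int]) -> Dict[str,int]:
--     total = sum(evs.values())
--     if total <= 510:
--         return evs
--     # Reduce EVs from highest to lowest until total <= 510.
--     # We reduce in chunks of 4 (valid EV increments).
--     ev_list = list(evs.items())
--     # Sort by EV descending, prefer to reduce stats with >0 EV
--     while total > 510:
--         # find stat with max ev > 0
--         stat_to_reduce = None
--         max_ev = 0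
--         for s, v in ev_list:
--             if v > max_ev:
--                 max_ev = v
--                 stat_to_reduce = s
--         if stat_to_reduce is None or max_ev <= 0:
--             break
--         # reduce by 4
--         evs[stat_to_reduce] = max(0, evs[stat_to_reduce] - 4)
--         total -= 4
--         # refresh ev_list
--         ev_list = list(evs.items())
--     return evs
-- ===== SOURCE B (Python) =====
-- def clamp_ev_distribution(evs):
--     total = sum(evs.values())
--     if total <= 510:
--         return evs
--     # stage 1: work on plain value list, with the number of 4-EV steps precomputed
--     keys = list(evs.keys())
--     vals = list(evs.values())
--     rem = (total - 510 + 3) // 4  # steps the cap requires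
--     while rem > 0:
--         M = max(vals)
--         if M <= 0:
--             break
--         i = vals.index(M)
--         # runner-up level among the other stats (floored at 0)
--         M2 = max([0] + vals[:i] + vals[i + 1:])
--         # the leader absorbs its whole run of consecutive reductions at once
--         t = min(rem, max(1, (M - M2 + 3) // 4))
--         vals[i] = max(0, M - 4 * t)
--         rem -= t
--     # stage 2: write the trimmed values back
--     for k, v in zip(keys, vals):
--         evs[k] = v
--     return evs
-- ===== Notes on version B (the rewrite author's own statement) =====
-- stated objective: alternative
-- what changed: B is staged instead of a dict-mutating simulation: it precomputes the required number of 4-EV steps, runs the trimming on a plain value list using builtin max/index/slices and applies each leader's whole run of consecutive reductions in one closed-form batch update, then writes the values back over the keys in one final pass.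
import Mathlib
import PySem

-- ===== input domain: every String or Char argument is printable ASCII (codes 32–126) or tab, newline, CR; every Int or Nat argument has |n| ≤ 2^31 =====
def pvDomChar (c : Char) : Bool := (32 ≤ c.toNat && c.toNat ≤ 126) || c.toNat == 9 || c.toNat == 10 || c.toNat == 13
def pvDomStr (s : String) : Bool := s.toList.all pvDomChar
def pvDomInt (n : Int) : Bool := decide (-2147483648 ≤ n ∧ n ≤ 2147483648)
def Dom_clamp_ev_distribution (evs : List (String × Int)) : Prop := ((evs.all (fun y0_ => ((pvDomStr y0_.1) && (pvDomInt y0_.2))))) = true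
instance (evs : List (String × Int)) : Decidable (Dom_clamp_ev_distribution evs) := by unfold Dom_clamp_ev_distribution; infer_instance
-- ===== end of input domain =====

-- B replaces A's dict-mutating one-step-at-a-time simulation by a staged list computation: a
-- precomputed step budget, batched closed-form reductions of the current leader found with
-- max/index, and one final write-back pass (objective: alternative algorithm, similar cost).
-- Both Pythons mutate the input dict in place the same way; the theorems are about the return value.

-- ===== PORT A =====

-- the inner 'for s, v in ev_list' scan: state (max_ev, stat_to_reduce)
def pvScanA (l : List (String × Int)) (acc : Int × Option String) : Int × Option String :=
  l.foldl (fun acc p => if p.2 > acc.1 then (p.2, some p.1) else acc) acc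

-- the 'while total > 510' loop of A (state: the dict and the running total); the Nat fuel only
-- makes the recursion structural — it is instantiated large enough that it never runs out
def pvLoopA (fuel : Nat) (d : PySem.Dict String Int) (total : Int) : PySem.Dict String Int :=
  match fuel with
  | 0 => d
  | fuel + 1 =>
    if total ≤ 510 then d
    else
      let r := pvScanA d.items (0, none)
      match r.2 with
      | none => d
      | some s =>
        if r.1 ≤ 0 then d
        else pvLoopA fuel (d.insert s (max 0 (d.getD s 0 - 4))) (total - 4)

def clamp_ev_distribution (evs : List (String × Int)) : List (String × Int) :=
  let d := PySem.Dict.mk evs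
  let total := d.values.foldl (· + ·) 0
  if total ≤ 510 then evs
  else (pvLoopA (total - 510).toNat d total).items

-- ===== PORT B =====

-- B's 'while rem > 0' loop over the plain value list (state: the values and the remaining step
-- budget); M = max(vals), i = vals.index(M), M2 = max([0] + vals[:i] + vals[i+1:]) — the slices
-- are exact as take/drop because 0 ≤ i < len(vals), and max([0] + l) is l.foldl max 0
-- (PySem.List.max?_id_cons).  The Nat fuel only makes the recursion structural: every iteration
-- lowers rem by at least 1, so rem.toNat suffices.  The two 'none' branches are unreachable
-- (Python's max/index on the nonempty vals cannot fail there).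
def pvStepsB (fuel : Nat) (vals : List Int) (rem : Int) : List Int :=
  match fuel with
  | 0 => vals
  | fuel + 1 =>
    if rem ≤ 0 then vals
    else
      match PySem.List.max? vals (fun v => v) with
      | none => vals
      | some M =>
        if M ≤ 0 then vals
        else
          match PySem.List.index? vals M with
          | none => vals
          | some i =>
            let M2 := (vals.take i ++ vals.drop (i + 1)).foldl max 0
            let t := min rem (max 1 (PySem.Int.floordiv (M - M2 + 3) 4))
            pvStepsB fuel (vals.set i (max 0 (M - 4 * t))) (rem - t)

def clamp_ev_distribution_alt (evs : List (String × Int)) : List (String × Int) :=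
  let d := PySem.Dict.mk evs
  let total := d.values.foldl (· + ·) 0
  if total ≤ 510 then evs
  else
    let keys := d.keys
    let rem := PySem.Int.floordiv (total - 510 + 3) 4
    let vals := pvStepsB rem.toNat d.values rem
    -- 'for k, v in zip(keys, vals): evs[k] = v; return evs'
    ((keys.zip vals).foldl (fun d p => d.insert p.1 p.2) d).items

-- ===== PRECONDITION & SPEC =====
-- A's parameter is a Python dict, so its assoc-list representation always has pairwise-distinct
-- keys; Pre_ states exactly that and excludes no input the Python A accepts.
def Pre_clamp_ev_distribution (evs : List (String × Int)) : Prop := (evs.map Prod.fst).Nodup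
instance (evs : List (String × Int)) : Decidable (Pre_clamp_ev_distribution evs) := by unfold Pre_clamp_ev_distribution; infer_instance

def pvWitness_clamp_ev_distribution : (List (String × Int)) := [("hp", 252), ("atk", 252), ("spe", 252)]

def Spec_clamp_ev_distribution (evs : List (String × Int)) (out : List (String × Int)) : Prop := out = clamp_ev_distribution_alt evs
instance (evs : List (String × Int)) (out : List (String × Int)) : Decidable (Spec_clamp_ev_distribution evs out) := by unfold Spec_clamp_ev_distribution; infer_instance

-- ===== CLAIM (what is proved, stated in full; the proofs are below) =====
def Claim_equal_clamp_ev_distribution : Prop := ∀ (evs : List (String × Int)), Dom_clamp_ev_distribution evs → Pre_clamp_ev_distribution evs → Spec_clamp_ev_distribution evs (clamp_ev_distribution evs)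

-- ===== LEMMAS AND PROOFS =====

theorem pvScanA_cons (p : String × Int) (l : List (String × Int)) (a : Int × Option String) :
    pvScanA (p :: l) a = pvScanA l (if p.2 > a.1 then (p.2, some p.1) else a) := rfl

-- if nothing beats the accumulator, the scan leaves it unchanged
theorem pvScanA_no_change (l : List (String × Int)) (m : Int) (i : Option String)
    (h : ∀ p ∈ l, p.2 ≤ m) : pvScanA l (m, i) = (m, i) := by
  induction l with
  | nil => rfl
  | cons p l ih =>
    have hp := h p (by simp)
    simp only [pvScanA, List.foldl_cons, if_neg (by omega : ¬ p.2 > m)]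
    exact ih (fun q hq => h q (by simp [hq]))

-- a strictly dominating positive entry is what the scan finds
theorem pvScanA_unique (l : List (String × Int)) (s : String) (w m0 : Int) (i0 : Option String)
    (hmem : (s, w) ∈ l) (hnd : (l.map Prod.fst).Nodup) (hm0 : m0 < w)
    (hoth : ∀ p ∈ l, p.1 ≠ s → p.2 < w) :
    pvScanA l (m0, i0) = (w, some s) := by
  induction l generalizing m0 i0 with
  | nil => cases hmem
  | cons p l ih =>
    rw [pvScanA_cons]
    rcases List.mem_cons.mp hmem with hp | hp
    · have hps : p.1 = s := by rw [← hp]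
      have hpv : p.2 = w := by rw [← hp]
      rw [if_pos (by omega : p.2 > m0), hpv, hps]
      apply pvScanA_no_change
      intro q hq
      have hqs : q.1 ≠ s := by
        intro hqeq
        have h1 : q.1 ∈ l.map Prod.fst := List.mem_map_of_mem (f := Prod.fst) hq
        exact (List.nodup_cons.mp hnd).1 (by rw [hps, ← hqeq]; exact h1)
      have := hoth q (List.mem_cons_of_mem _ hq) hqs
      omega
    · have hsml : s ∈ l.map Prod.fst := List.mem_map_of_mem (f := Prod.fst) hp
      have hps : p.1 ≠ s := fun hpeq => (List.nodup_cons.mp hnd).1 (by rw [hpeq]; exact hsml)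
      have hplt : p.2 < w := hoth p List.mem_cons_self hps
      by_cases hb : p.2 > m0
      · rw [if_pos hb]
        exact ih _ _ hp ((List.nodup_cons.mp hnd).2) hplt
          (fun q hq hqs => hoth q (List.mem_cons_of_mem _ hq) hqs)
      · rw [if_neg hb]
        exact ih _ _ hp ((List.nodup_cons.mp hnd).2) hm0
          (fun q hq hqs => hoth q (List.mem_cons_of_mem _ hq) hqs)

-- A's loop ignores its fuel once the total is within the cap
theorem pvLoopA_stop (f : Nat) (d : PySem.Dict String Int) (total : Int) (h : total ≤ 510) :
    pvLoopA f d total = d := by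
  cases f with
  | zero => rfl
  | succ f => simp [pvLoopA, if_pos h]

-- t consecutive iterations of A's loop all reduce the strictly dominating stat s
theorem pvBatch (t f : Nat) (d : PySem.Dict String Int) (s : String) (M M2 total : Int)
    (ht1 : 1 ≤ t) (htf : t ≤ f) (ht : t = 1 ∨ 4 * ((t : Int) - 1) < M - M2)
    (htot : total - 4 * ((t : Int) - 1) > 510)
    (hnd : d.keys.Nodup) (hget : d.get? s = some M) (hM : 0 < M) (hM2 : 0 ≤ M2)
    (hoth : ∀ p ∈ d.items, p.1 ≠ s → p.2 ≤ M2)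
    (hscan : pvScanA d.items (0, none) = (M, some s)) :
    pvLoopA f d total = pvLoopA (f - t) (d.insert s (max 0 (M - 4 * (t : Int)))) (total - 4 * (t : Int)) := by
  induction t generalizing f d M total with
  | zero => omega
  | succ n ihn =>
    obtain ⟨f', rfl⟩ : ∃ f', f = f' + 1 := ⟨f - 1, by omega⟩
    have hcast : ((n + 1 : Nat) : Int) = (n : Int) + 1 := by push_cast; ring
    have htot' : total > 510 := by rw [hcast] at htot; omega
    have hstep : pvLoopA (f' + 1) d total = pvLoopA f' (d.insert s (max 0 (M - 4))) (total - 4) := by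
      rw [pvLoopA]
      rw [if_neg (by omega : ¬ total ≤ 510)]
      simp only [hscan]
      rw [if_neg (by omega : ¬ M ≤ 0)]
      have hgd : d.getD s 0 = M := by rw [PySem.Dict.getD_eq_get?_getD, hget]; rfl
      rw [hgd]
    cases n with
    | zero => simpa using hstep
    | succ m =>
      have hgap : 4 * ((m : Int) + 1) < M - M2 := by
        rcases ht with h | h
        · omega
        · rw [hcast] at h; push_cast at h ⊢; omega
      have hM4 : max 0 (M - 4) = M - 4 := by omega
      rw [hstep, hM4]
      have hget1 : (d.insert s (M - 4)).get? s = some (M - 4) := PySem.Dict.get?_insert_self d s (M - 4)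
      have hnd1 : (d.insert s (M - 4)).keys.Nodup := PySem.Dict.nodup_keys_insert d s (M - 4) hnd
      have hoth1 : ∀ p ∈ (d.insert s (M - 4)).items, p.1 ≠ s → p.2 ≤ M2 := by
        intro p hp hps
        rcases (PySem.Dict.mem_items_insert _ _ _ _).mp hp with h | ⟨h, _⟩
        · exact absurd (congrArg Prod.fst h) hps
        · exact hoth p h hps
      have hscan1 : pvScanA (d.insert s (M - 4)).items (0, none) = (M - 4, some s) := by
        apply pvScanA_unique
        · exact PySem.Dict.mem_items_of_get?_eq_some _ hget1
        · exact hnd1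
        · omega
        · intro q hq hqs
          have := hoth1 q hq hqs
          omega
      have := ihn f' (d.insert s (M - 4)) (M - 4) (total - 4)
        (by omega) (by omega) (Or.inr (by push_cast at hgap ⊢; omega))
        (by push_cast at htot ⊢; omega)
        hnd1 hget1 (by omega) hoth1 hscan1
      rw [this, PySem.Dict.insert_insert_self]
      have e0 : f' - (m + 1) = f' + 1 - (m + 1 + 1) := by omega
      have e1 : M - 4 - 4 * ((m + 1 : Nat) : Int) = M - 4 * ((m + 1 + 1 : Nat) : Int) := by
        push_cast; ring
      have e2 : total - 4 - 4 * ((m + 1 : Nat) : Int) = total - 4 * ((m + 1 + 1 : Nat) : Int) := by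
        push_cast; ring
      rw [e0, e1, e2]

-- A's scan over the zipped key/value lists finds exactly (max(vals), key at vals.index(max))
theorem pvScanZip (vals : List Int) (keys : List String) (m : Int) (io : Option String)
    (M : Int) (i : Nat)
    (hlen : vals.length = keys.length)
    (hM : PySem.List.max? vals (fun v => v) = some M) (hm : m < M)
    (hi : PySem.List.index? vals M = some i) :
    ∃ hik : i < keys.length, pvScanA (keys.zip vals) (m, io) = (M, some (keys[i])) := by
  induction vals generalizing keys m io i with
  | nil => simp [PySem.List.max?] at hM
  | cons v vs ih =>
    obtain ⟨k, ks, rfl⟩ : ∃ k ks, keys = k :: ks := by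
      cases keys with
      | nil => simp at hlen
      | cons k ks => exact ⟨k, ks, rfl⟩
    have hMv : M = vs.foldl max v := by
      rw [PySem.List.max?_id_cons] at hM
      exact (Option.some_injective _ hM).symm
    by_cases hv : v = M
    · have hi0 : i = 0 := by
        rw [← hv, PySem.List.index?_cons_self] at hi
        exact (Option.some_injective _ hi).symm
      subst hi0
      refine ⟨by simp, ?_⟩
      rw [List.zip_cons_cons, pvScanA_cons, if_pos (by simp; omega)]
      have hall : ∀ p ∈ ks.zip vs, p.2 ≤ v := by
        intro p hp
        have h2 : p.2 ∈ vs := (List.of_mem_zip hp).2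
        have := (PySem.List.le_foldl_max vs v).2 p.2 h2
        omega
      simp only [List.getElem_cons_zero]
      rw [hv] at hall ⊢
      exact pvScanA_no_change _ _ _ hall
    · rw [PySem.List.index?_cons_of_ne vs hv] at hi
      obtain ⟨i', hi', rfl⟩ : ∃ i', PySem.List.index? vs M = some i' ∧ i = i' + 1 := by
        cases hq : PySem.List.index? vs M with
        | none => rw [hq] at hi; simp at hi
        | some j => rw [hq] at hi; exact ⟨j, rfl, by simpa using hi.symm⟩
      have hMmem : M ∈ vs := by
        obtain ⟨hk, hEq, -⟩ := PySem.List.getElem_of_index?_eq_some hi'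
        exact hEq ▸ List.getElem_mem _
      obtain ⟨w, vs', rfl⟩ : ∃ w vs', vs = w :: vs' := by
        cases vs with
        | nil => cases hMmem
        | cons w vs' => exact ⟨w, vs', rfl⟩
      have hvle : v ≤ M := by
        rw [hMv]; exact (PySem.List.le_foldl_max _ v).1
      have hvM : v < M := lt_of_le_of_ne hvle hv
      have hM' : PySem.List.max? (w :: vs') (fun x => x) = some M := by
        rw [PySem.List.max?_id_cons]
        congr 1
        have : (w :: vs').foldl max v = max v (vs'.foldl max w) := by
          simpa using (List.foldl_assoc (op := max) (l := vs') (a₁ := v) (a₂ := w))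
        rw [this] at hMv
        omega
      have hstep : pvScanA ((k :: ks).zip (v :: w :: vs')) (m, io)
          = pvScanA (ks.zip (w :: vs')) (if v > m then (v, some k) else (m, io)) := by
        rw [List.zip_cons_cons, pvScanA_cons]
      by_cases hvm : v > m
      · rw [if_pos hvm] at hstep
        obtain ⟨hik, hres⟩ := ih ks v (some k) i' (by simpa using hlen) hM' hvM hi'
        exact ⟨by simpa using Nat.succ_lt_succ hik, by rw [hstep, hres]; simp⟩
      · rw [if_neg hvm] at hstep
        obtain ⟨hik, hres⟩ := ih ks m io i' (by simpa using hlen) hM' hm hi'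
        exact ⟨by simpa using Nat.succ_lt_succ hik, by rw [hstep, hres]; simp⟩

-- replacing the i-th value through the dict's overwrite map is List.set on the value list
theorem pvZipSet (keys : List String) (vals : List Int) (i : Nat) (w : Int)
    (hnd : keys.Nodup) (hik : i < keys.length) (hlen : vals.length = keys.length) :
    (keys.zip vals).map (fun p => if p.1 == keys[i] then (keys[i], w) else p)
      = keys.zip (vals.set i w) := by
  induction keys generalizing vals i with
  | nil => simp at hik
  | cons k ks ih =>
    obtain ⟨v, vs, rfl⟩ : ∃ v vs, vals = v :: vs := by
      cases vals with
      | nil => simp at hlen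
      | cons v vs => exact ⟨v, vs, rfl⟩
    cases i with
    | zero =>
      simp only [List.getElem_cons_zero, List.zip_cons_cons, List.map_cons, beq_self_eq_true,
        if_pos, List.set_cons_zero]
      congr 1
      have : ∀ p ∈ ks.zip vs, (if p.1 == k then (k, w) else p) = p := by
        intro p hp
        have h1 : p.1 ∈ ks := (List.of_mem_zip hp).1
        have hk : p.1 ≠ k := fun h => (List.nodup_cons.mp hnd).1 (h ▸ h1)
        simp [hk]
      rw [List.map_congr_left this]
      simp
    | succ i' =>
      have hik' : i' < ks.length := by simpa using hik
      have hkne : k ≠ ks[i'] := by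
        intro h
        exact (List.nodup_cons.mp hnd).1 (h ▸ List.getElem_mem _)
      simp only [List.getElem_cons_succ, List.zip_cons_cons, List.map_cons,
        List.set_cons_succ]
      rw [if_neg (by simpa using hkne)]
      congr 1
      exact ih vs i' (List.nodup_cons.mp hnd).2 (by simpa using hik) (by simpa using hlen)

-- B's loop preserves the length of the value list
theorem pvStepsB_length (f : Nat) (vals : List Int) (rem : Int) :
    (pvStepsB f vals rem).length = vals.length := by
  induction f generalizing vals rem with
  | zero => rfl
  | succ f ih =>
    rw [pvStepsB]
    split_ifs with h1
    · rfl
    · cases PySem.List.max? vals (fun v => v) with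
      | none => rfl
      | some M =>
        dsimp only
        split_ifs with h2
        · rfl
        · cases PySem.List.index? vals M with
          | none => rfl
          | some i => rw [ih]; exact List.length_set ..

-- the write-back loop 'for k, v in zip(keys, vals): evs[k] = v' overwrites the dict's tail in place
theorem pvWriteBack (ks : List String) (vs ws : List Int) (d : PySem.Dict String Int)
    (pre : List (String × Int))
    (hd : d.items = pre ++ ks.zip ws) (hnd : (pre.map Prod.fst ++ ks).Nodup)
    (hvs : vs.length = ks.length) (hws : ws.length = ks.length) :
    ((ks.zip vs).foldl (fun d p => d.insert p.1 p.2) d).items = pre ++ ks.zip vs := by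
  induction ks generalizing vs ws d pre with
  | nil => simpa using hd
  | cons k ks' ih =>
    obtain ⟨v, vs', rfl⟩ : ∃ v vs', vs = v :: vs' := by
      cases vs with
      | nil => simp at hvs
      | cons v vs' => exact ⟨v, vs', rfl⟩
    obtain ⟨w, ws', rfl⟩ : ∃ w ws', ws = w :: ws' := by
      cases ws with
      | nil => simp at hws
      | cons w ws' => exact ⟨w, ws', rfl⟩
    have hmemk : k ∈ d.keys := by
      have hkw : (k, w) ∈ d.items := by
        rw [hd]
        exact List.mem_append_right _ (by rw [List.zip_cons_cons]; exact List.mem_cons_self)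
      simpa only [PySem.Dict.keys] using List.mem_map_of_mem (f := Prod.fst) hkw
    have hcont : d.contains k = true := (PySem.Dict.contains_iff_mem_keys d k).mpr hmemk
    have hsp := List.nodup_append.mp hnd
    have hknpre : k ∉ pre.map Prod.fst := fun hk => hsp.2.2 k hk k List.mem_cons_self rfl
    have hknks : k ∉ ks' := (List.nodup_cons.mp hsp.2.1).1
    have hitems1 : (d.insert k v).items = (pre ++ [(k, v)]) ++ ks'.zip ws' := by
      rw [PySem.Dict.items_insert_of_contains d v hcont, hd]
      rw [List.zip_cons_cons, List.map_append, List.map_cons]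
      have hpre : pre.map (fun p => if p.1 == k then (k, v) else p) = pre := by
        have : ∀ p ∈ pre, (if p.1 == k then (k, v) else p) = p := by
          intro p hp
          have h1 : p.1 ∈ pre.map Prod.fst := List.mem_map_of_mem (f := Prod.fst) hp
          have : p.1 ≠ k := fun h => hknpre (h ▸ h1)
          simp [this]
        rw [List.map_congr_left this, List.map_id' pre]
      have hrest : (ks'.zip ws').map (fun p => if p.1 == k then (k, v) else p) = ks'.zip ws' := by
        have : ∀ p ∈ ks'.zip ws', (if p.1 == k then (k, v) else p) = p := by
          intro p hp
          have h1 : p.1 ∈ ks' := (List.of_mem_zip hp).1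
          have : p.1 ≠ k := fun h => hknks (h ▸ h1)
          simp [this]
        rw [List.map_congr_left this, List.map_id' (ks'.zip ws')]
      rw [hpre, hrest]
      simp
    have hnd' : ((pre ++ [(k, v)]).map Prod.fst ++ ks').Nodup := by
      have : (pre ++ [(k, v)]).map Prod.fst ++ ks' = pre.map Prod.fst ++ k :: ks' := by
        simp
      rw [this]
      exact hnd
    have := ih vs' ws' (d.insert k v) (pre ++ [(k, v)]) hitems1 hnd'
      (by simpa using hvs) (by simpa using hws)
    simp only [List.zip_cons_cons, List.foldl_cons] at *
    rw [this]
    simp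
-- the two loops agree: A's dict items stay keys.zip of B's value list
theorem pvLoop_eq (g f : Nat) (keys : List String) (vals : List Int)
    (d : PySem.Dict String Int) (total rem : Int)
    (hd : d.items = keys.zip vals) (hlen : vals.length = keys.length) (hnd : keys.Nodup)
    (hrem : rem = PySem.Int.floordiv (total - 510 + 3) 4)
    (hg : rem.toNat ≤ g)
    (hf : total - 510 ≤ 4 * (f : Int)) :
    (pvLoopA f d total).items = keys.zip (pvStepsB g vals rem) := by
  induction g generalizing f d vals total rem with
  | zero =>
    have hfd : PySem.Int.floordiv (total - 510 + 3) 4 = (total - 510 + 3) / 4 :=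
      PySem.Int.floordiv_eq_ediv_of_pos (by norm_num)
    rw [hfd] at hrem
    rw [pvLoopA_stop f d total (by omega)]
    exact hd
  | succ g ih =>
    have hfd : PySem.Int.floordiv (total - 510 + 3) 4 = (total - 510 + 3) / 4 :=
      PySem.Int.floordiv_eq_ediv_of_pos (by norm_num)
    rw [hfd] at hrem
    by_cases hr : rem ≤ 0
    · rw [pvStepsB, if_pos hr, pvLoopA_stop f d total (by omega)]
      exact hd
    · have htgt : ¬ total ≤ 510 := by omega
      obtain ⟨f', rfl⟩ : ∃ f', f = f' + 1 := ⟨f - 1, by omega⟩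
      have hkeys : d.keys = keys := by
        simp only [PySem.Dict.keys, hd]
        exact List.map_fst_zip (by omega)
      rw [pvStepsB, if_neg hr]
      cases hMq : PySem.List.max? vals (fun v => v) with
      | none =>
        have hvnil : vals = [] := by
          cases vals with
          | nil => rfl
          | cons v vs => rw [PySem.List.max?_id_cons] at hMq; cases hMq
        subst hvnil
        have hdnil : d.items = [] := by simpa using hd
        dsimp only
        rw [pvLoopA, if_neg htgt]
        simp only [hdnil]
        have : pvScanA [] (0, none) = ((0 : Int), (none : Option String)) := rfl
        simp only [this]
        exact hdnil.trans (by simp)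
      | some M =>
        dsimp only
        by_cases hM0 : M ≤ 0
        · rw [if_pos hM0]
          have hall : ∀ p ∈ d.items, p.2 ≤ (0 : Int) := by
            intro p hp
            rw [hd] at hp
            have h2 : p.2 ∈ vals := (List.of_mem_zip hp).2
            have := PySem.List.max?_isMax hMq p.2 h2
            simp only at this
            omega
          rw [pvLoopA, if_neg htgt]
          simp only [pvScanA_no_change d.items 0 none hall]
          exact hd
        · rw [if_neg hM0]
          have hMmem : M ∈ vals := PySem.List.max?_mem hMq
          cases hiq : PySem.List.index? vals M with
          | none => exact absurd hMmem ((PySem.List.index?_eq_none_iff _ _).mp hiq)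
          | some i =>
            dsimp only
            obtain ⟨hik, hscanZ⟩ := pvScanZip vals keys 0 none M i hlen hMq (by omega) hiq
            obtain ⟨hiv, hivM, -⟩ := PySem.List.getElem_of_index?_eq_some hiq
            set s := keys[i] with hs
            set M2 := (vals.take i ++ vals.drop (i + 1)).foldl max 0 with hM2def
            have hM2nn : (0 : Int) ≤ M2 := (PySem.List.le_foldl_max _ 0).1
            have hoth : ∀ p ∈ d.items, p.1 ≠ s → p.2 ≤ M2 := by
              intro p hp hps
              rw [hd] at hp
              obtain ⟨j, hj, hpj⟩ := List.mem_iff_getElem.mp hp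
              have hjv : j < vals.length := by
                rw [List.length_zip] at hj
                omega
              have hjk : j < keys.length := by omega
              have hpj1 : p.1 = keys[j] := by
                rw [← hpj]; simp [List.getElem_zip]
              have hpj2 : p.2 = vals[j] := by
                rw [← hpj]; simp [List.getElem_zip]
              have hji : j ≠ i := by intro h; subst h; exact hps hpj1
              have hmem2 : vals[j] ∈ vals.take i ++ vals.drop (i + 1) := by
                rcases Nat.lt_or_ge j i with hji' | hji'
                · apply List.mem_append_left
                  have : (vals.take i)[j]'(by simp; omega) = vals[j] := List.getElem_take
                  exact this ▸ List.getElem_mem _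
                · have hji'' : i + 1 ≤ j := by omega
                  apply List.mem_append_right
                  have : (vals.drop (i + 1))[j - (i + 1)]'(by simp; omega) = vals[j] := by
                    rw [List.getElem_drop]
                    congr 1
                    omega
                  exact this ▸ List.getElem_mem _
              have := (PySem.List.le_foldl_max (vals.take i ++ vals.drop (i + 1)) 0).2 _ hmem2
              rw [hpj2]
              exact this
            have hget : d.get? s = some M := by
              have hmem : (s, M) ∈ d.items := by
                rw [hd, ← hivM]
                have : (keys.zip vals)[i]'(by rw [List.length_zip]; omega) = (keys[i], vals[i]) :=
                  List.getElem_zip ..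
                exact this ▸ List.getElem_mem _
              exact PySem.Dict.get?_of_mem_items d hmem (by rw [hkeys]; exact hnd)
            have hfd2 : PySem.Int.floordiv (M - M2 + 3) 4 = (M - M2 + 3) / 4 :=
              PySem.Int.floordiv_eq_ediv_of_pos (by norm_num)
            rw [hfd2]
            set t := min rem (max 1 ((M - M2 + 3) / 4)) with htdef
            have ht1 : 1 ≤ t := by omega
            have htr : t ≤ rem := by omega
            have htnat : ((t.toNat : Int)) = t := by omega
            have hbatch := pvBatch t.toNat (f' + 1) d s M M2 total (by omega) (by omega)
              (by rw [htnat]; omega) (by rw [htnat]; omega)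
              (by rw [hkeys]; exact hnd) hget (by omega) hM2nn hoth (by rw [hd]; exact hscanZ)
            rw [htnat] at hbatch
            have hins : (d.insert s (max 0 (M - 4 * t))).items
                = keys.zip (vals.set i (max 0 (M - 4 * t))) := by
              have hcont : d.contains s = true :=
                (PySem.Dict.contains_iff_mem_keys d s).mpr (by rw [hkeys]; exact List.getElem_mem _)
              rw [PySem.Dict.items_insert_of_contains d _ hcont, hd]
              exact pvZipSet keys vals i (max 0 (M - 4 * t)) hnd hik hlen
            have hihs := ih (f' + 1 - t.toNat) (vals.set i (max 0 (M - 4 * t)))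
              (d.insert s (max 0 (M - 4 * t))) (total - 4 * t) (rem - t)
              hins (by rw [List.length_set]; exact hlen) 
              (by
                rw [PySem.Int.floordiv_eq_ediv_of_pos (by norm_num : (0:Int) < 4)]
                omega)
              (by omega) (by omega)
            rw [hbatch, hihs]

-- ===== VERDICT (by name: the statement is the Claim_ definition above) =====
theorem clamp_ev_distribution_spec : Claim_equal_clamp_ev_distribution := by
  intro evs _ hpre
  unfold Spec_clamp_ev_distribution clamp_ev_distribution clamp_ev_distribution_alt
  by_cases h : (PySem.Dict.mk evs).values.foldl (· + ·) 0 ≤ 510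
  · rw [if_pos h, if_pos h]
  · rw [if_neg h, if_neg h]
    set d := PySem.Dict.mk evs with hddef
    set total := d.values.foldl (· + ·) 0 with htotdef
    have hnd : d.keys.Nodup := hpre
    have hd : d.items = d.keys.zip d.values := by
      simp only [PySem.Dict.keys, PySem.Dict.values]
      rw [List.zip_map']
      simp
    have hlen : d.values.length = d.keys.length := by
      simp [PySem.Dict.keys, PySem.Dict.values]
    set rem := PySem.Int.floordiv (total - 510 + 3) 4 with hremdef
    have hfd : rem = (total - 510 + 3) / 4 :=
      PySem.Int.floordiv_eq_ediv_of_pos (by norm_num)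
    have hA := pvLoop_eq rem.toNat (total - 510).toNat d.keys d.values d total rem
      hd hlen hnd hremdef le_rfl (by omega)
    rw [hA]
    exact (pvWriteBack d.keys (pvStepsB rem.toNat d.values rem) d.values d []
      (by simpa using hd) (by simpa using hnd)
      (by rw [pvStepsB_length]; exact hlen) hlen).symm
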